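-- pv_equiv track=rewrite | github.com/APSN4/SecondsInHumanTimeFormat | TimeConverter.py | _text
-- ===== SOURCE A (Python) =====
-- def _text(number, name, words):
--     myList = [21, 31, 41, 51, 61, 71, 81, 91]
--     number_local = str(number)
--     number_local = number_local[len(number_local)-1]
--     number_local = int(number_local)
--     local = ""
--     if number > 100:
--         number = str(number)
--         number = number[1:]
--         number.lstrip('0')
--         number = int(number)
--     if number < 21:
--         for timer_loop in range(1, number+1):
--             if timer_loop == 1:
--                 local = words[0]
--             elif timer_loop > 1 and timer_loop <= 4:
--                 local = words[1]
--             elif timer_loop > 4 and timer_loop < 21: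
--                 local = words[2]
--     elif number >= 21 and number <= 100:
--         timer_loop = 0
--         if number % 10 == 1:
--             local = words[0]
--         local = min(myList, key=lambda x:abs(x-number))
--         if local > number:
--             for i in myList:
--                 if number > i:
--                     local = i
--         checker = abs(local - number)
--         if checker == 0:
--             local = words[0]
--         elif checker == 1 or checker == 2 or checker == 3:
--             local = words[1]
--         else:
--             local = words[2]
--     return local
-- ===== SOURCE B (Python) =====
-- def _text(number, name, words):
--     # Same return value as A: strip the first digit of numbers > 100, then
--     # classify directly (no loop, no nearest-multiple scan).
--     if number > 100:
--         number = int(str(number)[1:])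
--     if number < 1 or number > 100:
--         return ""
--     k = number if number < 21 else number % 10
--     if k == 1:
--         return words[0]
--     if 2 <= k <= 4:
--         return words[1]
--     return words[2]
-- ===== Notes on version B (the rewrite author's own statement) =====
-- stated objective: simpler
-- what changed: Replaces the range(1,n+1) loop and the min/nearest-multiple scan over the fixed [21,31,...,91] list by direct classification: full value below 21, last digit for 21-100; Pre_ excludes exactly the inputs where A raises IndexError (word list too short for the selected form).
import Mathlib
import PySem

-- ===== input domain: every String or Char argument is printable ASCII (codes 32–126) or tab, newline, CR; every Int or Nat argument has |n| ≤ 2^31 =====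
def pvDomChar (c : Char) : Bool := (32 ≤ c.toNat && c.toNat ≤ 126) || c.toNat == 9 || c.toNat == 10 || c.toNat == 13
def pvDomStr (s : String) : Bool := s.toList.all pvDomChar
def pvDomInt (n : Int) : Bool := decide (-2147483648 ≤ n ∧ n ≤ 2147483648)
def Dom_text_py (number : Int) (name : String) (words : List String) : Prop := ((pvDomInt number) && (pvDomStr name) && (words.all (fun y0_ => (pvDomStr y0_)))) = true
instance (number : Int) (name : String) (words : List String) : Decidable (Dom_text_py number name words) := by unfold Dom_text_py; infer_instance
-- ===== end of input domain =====

-- B replaces A's range-loop and nearest-multiple min/scan by direct branch classification (same values; simpler).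


-- ===== PORT A =====
-- int(str(n)[1:]) — the first-digit strip both Pythons apply to numbers > 100.
-- For n > 100 the slice is a nonempty digit string, so int() succeeds and getD 0 is unreachable.
def pvStrip (n : Int) : Int :=
  (PySem.Int.ofChars? (PySem.List.slice (PySem.Int.toChars n) (some 1) none)).getD 0

def text_py (number : Int) (name : String) (words : List String) : String :=
  let myList : List Int := [21, 31, 41, 51, 61, 71, 81, 91]
  -- number_local = int(str(number)[-1]): computed but never used; str(number) ends in a digit, so int() succeeds
  let numberLocalChars := PySem.Int.toChars number
  let _numberLocal : Int :=
    (PySem.Int.ofChars? [PySem.List.pyGetD numberLocalChars ((numberLocalChars.length : Int) - 1) ' ']).getD 0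
  let localInit : String := ""
  let number := if number > 100 then pvStrip number else number
  if number < 21 then
    (PySem.List.pyRange 1 (number + 1) 1).foldl (fun loc t =>
      if t = 1 then PySem.List.pyGetD words 0 ""
      else if t > 1 ∧ t ≤ 4 then PySem.List.pyGetD words 1 ""
      else if t > 4 ∧ t < 21 then PySem.List.pyGetD words 2 ""
      else loc) localInit
  else if number ≥ 21 ∧ number ≤ 100 then
    -- 'if number % 10 == 1: local = words[0]' — local is overwritten below in every case
    let _local1 : String := if PySem.Int.mod number 10 = 1 then PySem.List.pyGetD words 0 "" else localInit
    -- min(myList, key=lambda x: abs(x-number)): nonempty literal list, never none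
    let m : Int := (PySem.List.min? myList (fun x => |x - number|)).getD 0
    let m := if m > number then myList.foldl (fun l i => if number > i then i else l) m else m
    let checker := |m - number|
    if checker = 0 then PySem.List.pyGetD words 0 ""
    else if checker = 1 ∨ checker = 2 ∨ checker = 3 then PySem.List.pyGetD words 1 ""
    else PySem.List.pyGetD words 2 ""
  else localInit

-- ===== PORT B =====
def text_py_alt (number : Int) (name : String) (words : List String) : String :=
  let number := if number > 100 then pvStrip number else number
  if number < 1 ∨ number > 100 then ""
  else
    let k := if number < 21 then number else PySem.Int.mod number 10
    if k = 1 then PySem.List.pyGetD words 0 ""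
    else if 2 ≤ k ∧ k ≤ 4 then PySem.List.pyGetD words 1 ""
    else PySem.List.pyGetD words 2 ""

-- ===== PRECONDITION & SPEC =====
-- index into words that the selected branch reads (1-, 2- or 3-word form)
def pvNeeded (r : Int) : Int :=
  let k := if r < 21 then r else PySem.Int.mod r 10
  if k = 1 then 1 else if 2 ≤ k ∧ k ≤ 4 then 2 else 3

-- Pre_ excludes exactly the inputs on which A raises IndexError: after the >100 first-digit
-- strip the value selects a word form whose index is beyond the end of `words`.
def Pre_text_py (number : Int) (name : String) (words : List String) : Prop :=
  let r := if number > 100 then pvStrip number else number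
  r < 1 ∨ 100 < r ∨ pvNeeded r ≤ (words.length : Int)
instance (number : Int) (name : String) (words : List String) : Decidable (Pre_text_py number name words) := by unfold Pre_text_py; infer_instance

def pvWitness_text_py : Int × String × List String := (37, "seconds", ["second", "seconds", "seconds"])

def Spec_text_py (number : Int) (name : String) (words : List String) (out : String) : Prop := out = text_py_alt number name words
instance (number : Int) (name : String) (words : List String) (out : String) : Decidable (Spec_text_py number name words out) := by unfold Spec_text_py; infer_instance

-- ===== CLAIM (what is proved, stated in full; the proofs are below) =====
def Claim_equal_text_py : Prop := ∀ (number : Int) (name : String) (words : List String), Dom_text_py number name words → Pre_text_py number name words → Spec_text_py number name words (text_py number name words)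

-- ===== LEMMAS AND PROOFS =====

-- Proof-only mirrors of the words-index each port selects (0, 1 or 2).
def pvIdxA (r : Int) : Int :=
  if r = 1 then 0
  else if 1 < r ∧ r ≤ 4 then 1
  else if r < 21 then 2
  else
    let m : Int := (PySem.List.min? [21, 31, 41, 51, 61, 71, 81, 91] (fun x => |x - r|)).getD 0
    let m := if m > r then [21, (31 : Int), 41, 51, 61, 71, 81, 91].foldl (fun l i => if r > i then i else l) m else m
    let checker := |m - r|
    if checker = 0 then 0 else if checker = 1 ∨ checker = 2 ∨ checker = 3 then 1 else 2

def pvIdxB (r : Int) : Int :=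
  let k := if r < 21 then r else PySem.Int.mod r 10
  if k = 1 then 0 else if 2 ≤ k ∧ k ≤ 4 then 1 else 2

set_option maxRecDepth 10000 in
theorem pv_idx_eq : ∀ r ∈ Finset.Icc (1 : ℤ) 100, pvIdxA r = pvIdxB r := by decide

theorem pv_loop (words : List String) (r : Int) (h1 : 1 ≤ r) (h2 : r < 21) :
    (PySem.List.pyRange 1 (r + 1) 1).foldl (fun loc t =>
      if t = 1 then PySem.List.pyGetD words 0 ""
      else if t > 1 ∧ t ≤ 4 then PySem.List.pyGetD words 1 ""
      else if t > 4 ∧ t < 21 then PySem.List.pyGetD words 2 ""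
      else loc) "" =
    PySem.List.pyGetD words (if r = 1 then 0 else if 1 < r ∧ r ≤ 4 then 1 else 2) "" := by
  rw [PySem.List.pyRange_one_succ_right h1, List.foldl_append]
  simp only [List.foldl]
  split_ifs <;> first | rfl | omega

theorem pv_main (r : Int) (words : List String) :
    (if r < 21 then
      (PySem.List.pyRange 1 (r + 1) 1).foldl (fun loc t =>
        if t = 1 then PySem.List.pyGetD words 0 ""
        else if t > 1 ∧ t ≤ 4 then PySem.List.pyGetD words 1 ""
        else if t > 4 ∧ t < 21 then PySem.List.pyGetD words 2 ""
        else loc) ""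
    else if r ≥ 21 ∧ r ≤ 100 then
      let m : Int := (PySem.List.min? [21, 31, 41, 51, 61, 71, 81, 91] (fun x => |x - r|)).getD 0
      let m := if m > r then [21, (31 : Int), 41, 51, 61, 71, 81, 91].foldl (fun l i => if r > i then i else l) m else m
      let checker := |m - r|
      if checker = 0 then PySem.List.pyGetD words 0 ""
      else if checker = 1 ∨ checker = 2 ∨ checker = 3 then PySem.List.pyGetD words 1 ""
      else PySem.List.pyGetD words 2 ""
    else "") =
    (if r < 1 ∨ r > 100 then ""
    else
      let k := if r < 21 then r else PySem.Int.mod r 10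
      if k = 1 then PySem.List.pyGetD words 0 ""
      else if 2 ≤ k ∧ k ≤ 4 then PySem.List.pyGetD words 1 ""
      else PySem.List.pyGetD words 2 "") := by
  by_cases h1 : r < 1
  · rw [if_pos (by omega : r < 21), if_pos (Or.inl h1)]
    have h0 : ((r + 1 - 1 : ℤ)).toNat = 0 := by omega
    rw [PySem.List.pyRange_one, h0]
    rfl
  · by_cases h2 : r ≤ 100
    · have hmem : r ∈ Finset.Icc (1 : ℤ) 100 := Finset.mem_Icc.2 ⟨by omega, h2⟩
      have hidx := pv_idx_eq r hmem
      rw [if_neg (by omega : ¬ (r < 1 ∨ r > 100))]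
      by_cases h3 : r < 21
      · rw [if_pos h3, pv_loop words r (by omega) h3]
        unfold pvIdxA pvIdxB at hidx
        dsimp only at hidx ⊢
        rw [if_pos h3] at hidx
        rw [if_pos h3]
        split_ifs at hidx ⊢ <;> first | rfl | omega
      · rw [if_neg h3, if_pos ⟨by omega, h2⟩]
        unfold pvIdxA pvIdxB at hidx
        rw [if_neg (by omega : ¬ r = 1), if_neg (by omega : ¬ (1 < r ∧ r ≤ 4)),
            if_neg h3] at hidx
        rw [if_neg h3] at hidx
        dsimp only at hidx ⊢
        split_ifs at hidx ⊢ <;> first | rfl | omega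
    · rw [if_neg (by omega : ¬ r < 21), if_neg (by omega : ¬ (r ≥ 21 ∧ r ≤ 100)),
          if_pos (Or.inr (by omega : r > 100))]

-- ===== VERDICT (by name: the statement is the Claim_ definition above) =====
theorem text_py_spec : Claim_equal_text_py := by
  intro number name words _ _
  unfold Spec_text_py
  simp only [text_py, text_py_alt]
  generalize (if number > 100 then pvStrip number else number) = r
  exact pv_main r words
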